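-- pv_equiv track=rewrite | github.com/tbustenk/evadex | tests/unit/variants/test_entropy_evasion.py | _longest_nondelim_run
-- ===== SOURCE A (Python) =====
-- SIPHON_DELIMITERS = set(" \t\n,;'\"()[]{}=:")
--
-- def _longest_nondelim_run(text: str) -> str:
--     best = ""
--     cur = []
--     for ch in text:
--         if ch in SIPHON_DELIMITERS:
--             if len("".join(cur)) > len(best):
--                 best = "".join(cur)
--             cur = []
--         else:
--             cur.append(ch)
--     if len("".join(cur)) > len(best):
--         best = "".join(cur)
--     return best
-- ===== SOURCE B (Python) =====
-- SIPHON_DELIMITERS = set(" \t\n,;'\"()[]{}=:")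
--
--
-- def _longest_nondelim_run(text: str) -> str:
--     # Collect-then-reduce: build the full list of runs first, then take the
--     # first longest with one max(key=len) pass.
--     runs = [[]]
--     for ch in text:
--         if ch in SIPHON_DELIMITERS:
--             runs.append([])
--         else:
--             runs[-1].append(ch)
--     return "".join(max(runs, key=len))
-- ===== Notes on version B (the rewrite author's own statement) =====
-- stated objective: simpler
-- what changed: A interleaves a best-so-far/current-run accumulator with a strict-greater compare at every delimiter; B first collects the complete list of delimiter-separated runs and then takes the first longest with a single max(key=len) reduce.
import Mathlib
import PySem

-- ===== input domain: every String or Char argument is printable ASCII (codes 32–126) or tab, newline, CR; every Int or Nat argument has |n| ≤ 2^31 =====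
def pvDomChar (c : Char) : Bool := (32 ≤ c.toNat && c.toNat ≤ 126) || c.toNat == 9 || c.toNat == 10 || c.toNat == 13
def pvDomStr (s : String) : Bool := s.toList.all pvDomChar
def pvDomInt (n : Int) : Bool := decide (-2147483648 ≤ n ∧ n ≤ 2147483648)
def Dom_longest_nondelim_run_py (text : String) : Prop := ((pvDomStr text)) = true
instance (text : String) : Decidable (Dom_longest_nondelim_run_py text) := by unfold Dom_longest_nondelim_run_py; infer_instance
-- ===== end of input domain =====

-- B collects the full list of delimiter-separated runs first and takes the first longest with
-- one max(key=len) reduce, instead of A's interleaved best/current accumulator loop (objective: simpler).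

-- SIPHON_DELIMITERS (membership test only, so a plain list is exact for the Python set)
def pvDelims : List Char := " \t\n,;'\"()[]{}=:".toList

-- ===== PORT A =====
-- A's loop state: (best, cur); "".join(cur) is cur itself on the List Char side.
def longest_nondelim_run_py (text : String) : String :=
  let st := text.toList.foldl
    (fun (p : List Char × List Char) ch =>
      if ch ∈ pvDelims then
        (if p.1.length < p.2.length then p.2 else p.1, [])
      else
        (p.1, p.2 ++ [ch]))
    ([], [])
  String.ofList (if st.1.length < st.2.length then st.2 else st.1)

-- ===== PORT B =====
-- runs starts as [[]]; a delimiter appends a fresh run, otherwise the char is appended to runs[-1].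
def longest_nondelim_run_py_alt (text : String) : String :=
  let runs := text.toList.foldl
    (fun (runs : List (List Char)) ch =>
      if ch ∈ pvDelims then runs ++ [[]]
      else runs.dropLast ++ [(runs.getLast?.getD []) ++ [ch]])
    [[]]
  String.ofList (PySem.List.maxD runs (fun r => r.length) [])

-- ===== PRECONDITION & SPEC =====
def Spec_longest_nondelim_run_py (text : String) (out : String) : Prop := out = longest_nondelim_run_py_alt text
instance (text : String) (out : String) : Decidable (Spec_longest_nondelim_run_py text out) := by unfold Spec_longest_nondelim_run_py; infer_instance

-- ===== CLAIM (what is proved, stated in full; the proofs are below) =====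
def Claim_equal_longest_nondelim_run_py : Prop := ∀ (text : String), Dom_longest_nondelim_run_py text → Spec_longest_nondelim_run_py text (longest_nondelim_run_py text)

-- ===== LEMMAS AND PROOFS =====

-- the binary "keep the first longest" chooser both programs reduce with
def pvChoose (b c : List Char) : List Char := if b.length < c.length then c else b

def pvStepA (p : List Char × List Char) (ch : Char) : List Char × List Char :=
  if ch ∈ pvDelims then (pvChoose p.1 p.2, []) else (p.1, p.2 ++ [ch])

def pvStepB (runs : List (List Char)) (ch : Char) : List (List Char) :=
  if ch ∈ pvDelims then runs ++ [[]]
  else runs.dropLast ++ [(runs.getLast?.getD []) ++ [ch]]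

theorem pvChoose_nil_left (c : List Char) : pvChoose [] c = c := by
  unfold pvChoose
  rcases c with _ | ⟨x, t⟩ <;> simp

-- B's fold only touches the last run and appends at the end
theorem pvFoldB_split (cs : List Char) :
    ∀ (pre : List (List Char)) (cur : List Char),
      cs.foldl pvStepB (pre ++ [cur]) = pre ++ cs.foldl pvStepB [cur] := by
  induction cs with
  | nil => intro pre cur; rfl
  | cons ch t ih =>
      intro pre cur
      by_cases h : ch ∈ pvDelims
      · simp only [List.foldl_cons, pvStepB, h, if_pos]
        calc t.foldl pvStepB ((pre ++ [cur]) ++ [([] : List Char)])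
            = (pre ++ [cur]) ++ t.foldl pvStepB [[]] := ih (pre ++ [cur]) []
          _ = pre ++ ([cur] ++ t.foldl pvStepB [[]]) := by simp
          _ = pre ++ t.foldl pvStepB ([cur] ++ [[]]) := by rw [ih [cur] ([] : List Char)]
      · simp only [List.foldl_cons, pvStepB, h, if_neg, not_false_iff]
        have hd : (pre ++ [cur]).dropLast = pre := by simp
        have hl : (pre ++ [cur]).getLast? = some cur := by simp
        rw [hd, hl]
        have hd2 : ([cur] : List (List Char)).dropLast = [] := by simp
        have hl2 : ([cur] : List (List Char)).getLast? = some cur := by simp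
        rw [hd2, hl2]
        simpa using ih pre (cur ++ [ch])

-- A's finished fold is the chooser-reduce of B's runs list
theorem pvMain (cs : List Char) :
    ∀ (best cur : List Char),
      pvChoose (cs.foldl pvStepA (best, cur)).1 (cs.foldl pvStepA (best, cur)).2
        = (cs.foldl pvStepB [cur]).foldl pvChoose best := by
  induction cs with
  | nil => intro best cur; simp
  | cons ch t ih =>
      intro best cur
      by_cases h : ch ∈ pvDelims
      · simp only [List.foldl_cons, pvStepA, pvStepB, h, if_pos]
        rw [ih (pvChoose best cur) []]
        have hsplit : t.foldl pvStepB ([cur] ++ [[]]) = [cur] ++ t.foldl pvStepB [[]] :=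
          pvFoldB_split t [cur] []
        simp only [List.cons_append, List.nil_append] at hsplit ⊢
        rw [hsplit]
        simp
      · simp only [List.foldl_cons, pvStepA, pvStepB, h, if_neg, not_false_iff]
        rw [ih best (cur ++ [ch])]
        simp

-- Python max(runs, key=len) agrees with the chooser-reduce from the empty run
theorem pvMaxD_eq (rs : List (List Char)) :
    PySem.List.maxD rs (fun r => r.length) [] = rs.foldl pvChoose [] := by
  rcases rs with _ | ⟨r, t⟩
  · rfl
  · have h1 : PySem.List.max? (r :: t) (fun r : List Char => r.length)
        = some (t.foldl pvChoose r) := by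
      simp only [PySem.List.max?, List.foldl_cons]
      induction t generalizing r with
      | nil => rfl
      | cons x t ih =>
          simp only [List.foldl_cons, pvChoose]
          split <;> exact ih _
    simp only [PySem.List.maxD, h1, Option.getD_some, List.foldl_cons, pvChoose_nil_left]

-- ===== VERDICT (by name: the statement is the Claim_ definition above) =====
theorem longest_nondelim_run_py_spec : Claim_equal_longest_nondelim_run_py := by
  intro text _
  unfold Spec_longest_nondelim_run_py longest_nondelim_run_py longest_nondelim_run_py_alt
  have hA : (fun (p : List Char × List Char) ch =>
      if ch ∈ pvDelims then
        (if p.1.length < p.2.length then p.2 else p.1, ([] : List Char))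
      else (p.1, p.2 ++ [ch])) = pvStepA := by
    funext p ch; simp [pvStepA, pvChoose]
  have hB : (fun (runs : List (List Char)) ch =>
      if ch ∈ pvDelims then runs ++ [[]]
      else runs.dropLast ++ [(runs.getLast?.getD []) ++ [ch]]) = pvStepB := by
    funext runs ch; simp [pvStepB]
  simp only [hA, hB, pvMaxD_eq]
  congr 1
  exact pvMain text.toList [] []
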